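-- pv_equiv track=rewrite | github.com/iamnishantchandra/DSA-QA-Using-Python | 10X/Python/Array/Choclate Bars.py | result
-- ===== SOURCE A (Python) =====
-- import math
--
-- def factor(n):
--     count=0
--     for i in range(1,1+int(math.sqrt(n))):
--         if n%i==0:
--             count+=1
--             if n//i!=i:
--                 count+=1
--     return count
--
-- def result(ar,n):
--     d={}
--     for i in ar:
--         x=factor(i)
--         if x in d:
--             d[x]+=1
--         else:
--             d[x]=1
--     res=0
--     for x in d:
--         res+=(d[x]*(d[x]-1))//2
--     return res
-- ===== SOURCE B (Python) =====
-- import math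
--
-- def factor(n):
--     count=0
--     for i in range(1,1+int(math.sqrt(n))):
--         if n%i==0:
--             count+=1
--             if n//i!=i:
--                 count+=1
--     return count
--
-- def result(ar, n):
--     # Brute-force pair counting on the list of divisor counts: no dict at all.
--     # For each position j, add how many earlier positions carry the same count.
--     counts = [factor(v) for v in ar]
--     res = 0
--     for j in range(len(counts)):
--         res += counts[:j].count(counts[j])
--     return res
-- ===== Notes on version B (the rewrite author's own statement) =====
-- stated objective: alternative
-- what changed: B drops the dict histogram entirely: it materialises the list of divisor counts and counts pairs by a quadratic prefix scan (for each position, count equal values among earlier positions), instead of A's hash histogram plus a second loop summing d[x]*(d[x]-1)//2.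
import Mathlib
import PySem

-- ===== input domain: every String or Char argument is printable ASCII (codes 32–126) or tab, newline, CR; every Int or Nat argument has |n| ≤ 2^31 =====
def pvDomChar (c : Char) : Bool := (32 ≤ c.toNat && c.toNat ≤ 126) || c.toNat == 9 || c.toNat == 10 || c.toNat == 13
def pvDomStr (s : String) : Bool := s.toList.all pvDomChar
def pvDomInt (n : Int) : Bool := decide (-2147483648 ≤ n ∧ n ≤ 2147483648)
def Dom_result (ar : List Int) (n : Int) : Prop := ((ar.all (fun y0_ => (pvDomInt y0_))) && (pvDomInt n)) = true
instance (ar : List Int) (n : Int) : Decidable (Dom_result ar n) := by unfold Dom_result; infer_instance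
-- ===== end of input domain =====

-- B replaces A's dict histogram + closed-form second loop by a dict-free quadratic prefix scan over the list of divisor counts (alternative algorithm, not faster).

-- ===== PORT A =====
-- int(math.sqrt(m)) is ported as Int.sqrt m: exact for 0 ≤ m ≤ 2^31 (the range Dom_ + Pre_ admit, where the float sqrt is exact)
def factor (m : Int) : Int :=
  (PySem.List.pyRange 1 (1 + Int.sqrt m) 1).foldl
    (fun count i =>
      if PySem.Int.mod m i == 0 then
        if PySem.Int.floordiv m i != i then count + 1 + 1 else count + 1
      else count) 0

def result (ar : List Int) (n : Int) : Int :=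
  let d : PySem.Dict Int Int :=
    ar.foldl (fun d i =>
      let x := factor i
      if d.contains x then d.modify x 0 (· + 1) else d.insert x 1) PySem.Dict.empty
  d.keys.foldl (fun res x => res + PySem.Int.floordiv (d.getD x 0 * (d.getD x 0 - 1)) 2) 0

-- ===== PORT B =====
def result_alt (ar : List Int) (n : Int) : Int :=
  let counts := ar.map factor
  (PySem.List.pyRange 0 (counts.length : Int) 1).foldl
    (fun res j => res + ((PySem.List.slice counts (some 0) (some j)).count (PySem.List.pyGetD counts j 0) : Int)) 0

-- ===== PRECONDITION & SPEC =====
-- Pre_ excludes lists with a negative element: math.sqrt raises ValueError there (in A and in B alike).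
def Pre_result (ar : List Int) (n : Int) : Prop := ∀ x ∈ ar, 0 ≤ x
instance (ar : List Int) (n : Int) : Decidable (Pre_result ar n) := by unfold Pre_result; infer_instance
def pvWitness_result : List Int × Int := ([1, 2, 3, 4, 4, 6], 6)

def Spec_result (ar : List Int) (n : Int) (out : Int) : Prop := out = result_alt ar n
instance (ar : List Int) (n : Int) (out : Int) : Decidable (Spec_result ar n out) := by unfold Spec_result; infer_instance

-- ===== CLAIM (what is proved, stated in full; the proofs are below) =====
def Claim_equal_result : Prop := ∀ (ar : List Int) (n : Int), Dom_result ar n → Pre_result ar n → Spec_result ar n (result ar n)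

-- ===== LEMMAS AND PROOFS =====

-- the common closed form both sides are reduced to: C(count, 2) summed over the distinct divisor-counts
def pvC2 (c : Int) : Int := PySem.Int.floordiv (c * (c - 1)) 2

def pvF (xs : List Int) : Int :=
  ((PySem.Set.ofList xs).map (fun x => pvC2 ((xs.count x : Int)))).sum

theorem pvStepA_eq_modify (d : PySem.Dict Int Int) (x : Int) :
    (if d.contains x then d.modify x 0 (· + 1) else d.insert x 1) = d.modify x 0 (· + 1) := by
  by_cases h : d.contains x
  · simp [h]
  · have h' : d.contains x = false := by simpa using h
    simp [PySem.Dict.modify, h', PySem.Dict.getD_of_not_contains d 0 h']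

theorem pvA_eq_F (xs : List Int) :
    ((PySem.Dict.counter xs).keys.foldl
      (fun res x => res + PySem.Int.floordiv ((PySem.Dict.counter xs).getD x 0 * ((PySem.Dict.counter xs).getD x 0 - 1)) 2) 0)
    = pvF xs := by
  simp [PySem.List.foldl_add, PySem.Dict.keys_counter, PySem.Dict.getD_counter, pvF, pvC2]

theorem pvC2_succ (c : Int) : pvC2 (c + 1) = pvC2 c + c := by
  rcases Int.even_mul_succ_self (c - 1) with ⟨k, hk⟩
  have h1 : c * (c - 1) = 2 * k := by ring_nf; ring_nf at hk; linarith
  have h2 : (c + 1) * c = 2 * (k + c) := by nlinarith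
  simp [pvC2, h1, h2, Int.mul_ediv_cancel_left _ (by norm_num : (2 : Int) ≠ 0)]

theorem pvSum_update (l : List Int) (f g : Int → Int) (y : Int) (hnd : l.Nodup) (hy : y ∈ l)
    (h : ∀ x ∈ l, x ≠ y → g x = f x) :
    (l.map g).sum = (l.map f).sum + (g y - f y) := by
  induction l with
  | nil => simp at hy
  | cons a l ih =>
    rcases List.nodup_cons.mp hnd with ⟨ha, hnd'⟩
    by_cases hay : a = y
    · subst hay
      have : l.map g = l.map f := List.map_congr_left (fun x hx => h x (.tail _ hx) (fun e => ha (e ▸ hx)))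
      simp [this]; ring
    · rcases List.mem_cons.mp hy with hy | hy
      · exact absurd hy.symm hay
      · have := ih hnd' hy (fun x hx hne => h x (.tail _ hx) hne)
        simp [this, h a (.head _) hay]; ring

theorem pvF_append (xs : List Int) (y : Int) :
    pvF (xs ++ [y]) = pvF xs + (xs.count y : Int) := by
  unfold pvF
  rw [PySem.Set.ofList_append_singleton]
  by_cases hy : y ∈ xs
  · rw [PySem.Set.add_of_mem (by simpa [PySem.Set.mem_ofList] using hy)]
    rw [pvSum_update (PySem.Set.ofList xs)
      (fun x => pvC2 ((xs.count x : Int))) (fun x => pvC2 (((xs ++ [y]).count x : Int))) y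
      (PySem.Set.nodup_ofList xs) (by simpa [PySem.Set.mem_ofList] using hy)
      (fun x hx hne => by simp [List.count_append, Ne.symm hne])]
    have : (((xs ++ [y]).count y : Int)) = (xs.count y : Int) + 1 := by
      simp [List.count_append]
    rw [this, pvC2_succ]; ring
  · rw [PySem.Set.add_of_not_mem (by simpa [PySem.Set.mem_ofList] using hy)]
    rw [List.map_append, List.sum_append]
    have h1 : (PySem.Set.ofList xs).map (fun x => pvC2 (((xs ++ [y]).count x : Int)))
        = (PySem.Set.ofList xs).map (fun x => pvC2 ((xs.count x : Int))) := by
      apply List.map_congr_left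
      intro x hx
      have hxy : x ≠ y := fun e => hy (e ▸ (by simpa [PySem.Set.mem_ofList] using hx : x ∈ xs))
      simp [List.count_append, Ne.symm hxy]
    rw [h1]
    simp [List.count_append, List.count_eq_zero_of_not_mem hy, pvC2, PySem.Int.floordiv]

-- B's loop body, on a generic list of divisor counts
theorem pvB_eq_F (cs : List Int) :
    ((PySem.List.pyRange 0 (cs.length : Int) 1).foldl
      (fun res j => res + ((PySem.List.slice cs (some 0) (some j)).count (PySem.List.pyGetD cs j 0) : Int)) 0)
    = pvF cs := by
  induction cs using List.reverseRecOn with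
  | nil => simp [pvF, PySem.List.pyRange_one_eq_nil]
  | append_singleton cs y ih =>
    have hl : (((cs ++ [y]).length : Int)) = (cs.length : Int) + 1 := by simp
    rw [hl, PySem.List.pyRange_one_succ_right (Int.natCast_nonneg _), List.foldl_append]
    have hcongr :
        (PySem.List.pyRange 0 (cs.length : Int) 1).foldl
          (fun res j => res + ((PySem.List.slice (cs ++ [y]) (some 0) (some j)).count (PySem.List.pyGetD (cs ++ [y]) j 0) : Int)) 0
        = (PySem.List.pyRange 0 (cs.length : Int) 1).foldl
          (fun res j => res + ((PySem.List.slice cs (some 0) (some j)).count (PySem.List.pyGetD cs j 0) : Int)) 0 := by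
      apply PySem.List.foldl_congr_mem'
      intro j hj acc
      rcases (PySem.List.mem_pyRange_one).mp hj with ⟨hj0, hjl⟩
      obtain ⟨k, rfl⟩ : ∃ k : ℕ, j = (k : Int) := ⟨j.toNat, (Int.toNat_of_nonneg hj0).symm⟩
      have hk : k < cs.length := by exact_mod_cast hjl
      have hs : PySem.List.slice (cs ++ [y]) (some 0) (some (k : Int)) = PySem.List.slice cs (some 0) (some (k : Int)) := by
        simp [PySem.List.slice_to_natCast, List.take_append_of_le_length (le_of_lt hk)]
      have hg : PySem.List.pyGetD (cs ++ [y]) (k : Int) 0 = PySem.List.pyGetD cs (k : Int) 0 := by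
        simp [List.getElem?_append_left hk]
      rw [hs, hg]
    rw [hcongr, ih]
    have h2 : PySem.List.pyGetD (cs ++ [y]) (cs.length : Int) 0 = y := by
      simp [List.getD]
    simp [h2, pvF_append]

-- ===== VERDICT (by name: the statement is the Claim_ definition above) =====
theorem result_spec : Claim_equal_result := by
  intro ar n _ _
  unfold Spec_result result result_alt
  simp only [pvStepA_eq_modify]
  rw [show (fun (d : PySem.Dict Int Int) (i : Int) => d.modify (factor i) 0 (· + 1))
        = (fun d i => (fun (d : PySem.Dict Int Int) (x : Int) => d.modify x 0 (· + 1)) d (factor i)) from rfl,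
      ← List.foldl_map (g := fun (d : PySem.Dict Int Int) (x : Int) => d.modify x 0 (· + 1)) (f := factor), ← PySem.Dict.counter_eq_foldl,
      pvA_eq_F, ← pvB_eq_F (ar.map factor)]
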